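-- pv_equiv track=rewrite | github.com/Nivratti/recodai-luc-sifd-4th-place-solution | tools/viz/visualize_rsiid_compound_figures.py | _parse_class_args
-- ===== SOURCE A (Python) =====
-- from typing import Any, Dict, List, Optional, Tuple
--
-- def _parse_class_args(vals: Optional[List[str]]) -> List[str]:
--     """
--     Accepts:
--       --only-classes A B C
--     and also:
--       --only-classes "A,B,C"
--     """
--     if not vals:
--         return []
--     out: List[str] = []
--     for v in vals:
--         if v is None:
--             continue
--         v = str(v).strip()
--         if not v:
--             continue
--         if "," in v:
--             out.extend([x.strip() for x in v.split(",") if x.strip()])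
--         else:
--             out.append(v)
--     return out
-- ===== SOURCE B (Python) =====
-- from typing import List, Optional
--
--
-- def _parse_class_args(vals: Optional[List[str]]) -> List[str]:
--     """Join everything with commas, then do one split/strip/filter pass."""
--     joined = ",".join(str(v) for v in (vals or []) if v is not None)
--     return [p for p in (piece.strip() for piece in joined.split(",")) if p]
-- ===== Notes on version B (the rewrite author's own statement) =====
-- stated objective: alternative
-- what changed: Replaces A's per-element comma/non-comma branching with extend/append accumulation by a concatenate-then-split shape: join all values with commas into one string, then a single split/strip/filter pass over the pieces.
import Mathlib
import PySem

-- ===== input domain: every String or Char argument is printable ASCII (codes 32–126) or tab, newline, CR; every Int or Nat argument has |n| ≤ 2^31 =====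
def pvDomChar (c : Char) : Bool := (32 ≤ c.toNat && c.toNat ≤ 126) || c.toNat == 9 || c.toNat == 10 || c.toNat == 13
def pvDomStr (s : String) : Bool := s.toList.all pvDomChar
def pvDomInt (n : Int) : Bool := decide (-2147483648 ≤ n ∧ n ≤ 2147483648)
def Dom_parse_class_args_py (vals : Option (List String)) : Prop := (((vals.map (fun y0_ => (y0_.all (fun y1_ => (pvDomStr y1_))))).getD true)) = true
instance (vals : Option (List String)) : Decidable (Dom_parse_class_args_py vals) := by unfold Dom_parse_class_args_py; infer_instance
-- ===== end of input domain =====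

-- B joins all values with commas into one string and does a single split/strip/filter
-- pass, replacing A's per-element comma/non-comma branching; return values agree everywhere.

-- ===== PORT A =====
-- literal transliteration of A: early [] on falsy vals, then a loop with
-- strip / emptiness / comma branching, extending or appending an accumulator.
def parse_class_args_py (vals : Option (List String)) : List String :=
  match vals with
  | none => []
  | some l =>
    if l.isEmpty then []       -- "if not vals: return []" (empty-list half)
    else
      l.foldl (fun out v =>
        let v' := PySem.Str.strip v
        if v' = "" then out
        else if PySem.Str.isIn "," v' then
          out ++ ((((PySem.Str.split? v' ",").getD []).map PySem.Str.strip).filter (fun x => x ≠ ""))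
        else out ++ [v']) []

-- ===== PORT B =====
-- literal transliteration of B: join with "," then one split/strip/filter pass.
def parse_class_args_py_alt (vals : Option (List String)) : List String :=
  let joined := PySem.Str.join "," (vals.getD [])
  (((PySem.Str.split? joined ",").getD []).map PySem.Str.strip).filter (fun p => p ≠ "")

-- ===== PRECONDITION & SPEC =====
def Spec_parse_class_args_py (vals : Option (List String)) (out : List String) : Prop := out = parse_class_args_py_alt vals
instance (vals : Option (List String)) (out : List String) : Decidable (Spec_parse_class_args_py vals out) := by unfold Spec_parse_class_args_py; infer_instance

-- ===== CLAIM (what is proved, stated in full; the proofs are below) =====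
def Claim_equal_parse_class_args_py : Prop := ∀ (vals : Option (List String)), Dom_parse_class_args_py vals → Spec_parse_class_args_py vals (parse_class_args_py vals)

-- ===== LEMMAS AND PROOFS =====

-- structural recursion equal to Python's s.split(",") on char lists
def splitC : List Char → List (List Char)
  | [] => [[]]
  | c :: rest => if c = ',' then [] :: splitC rest else (splitC rest).modifyHead (c :: ·)

-- append a char to the last piece
def appLast : List (List Char) → Char → List (List Char)
  | [], _ => []
  | [p], c => [p ++ [c]]
  | p :: q :: r, c => p :: appLast (q :: r) c

-- the common normal form: split at commas, strip each piece, drop empties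
def gC (cs : List Char) : List (List Char) :=
  ((splitC cs).map PySem.Chars.strip).filter (fun p => p ≠ [])

theorem splitC_ne_nil (cs : List Char) : splitC cs ≠ [] := by
  induction cs with
  | nil => simp [splitC]
  | cons c rest ih =>
    simp only [splitC]
    split
    · simp
    · cases h : splitC rest with
      | nil => exact absurd h ih
      | cons p r => simp [List.modifyHead_cons]

theorem splitOn_go_spec (fuel : Nat) (cs cur : List Char) (acc : List (List Char))
    (h : cs.length ≤ fuel) :
    PySem.Chars.splitOn.go [','] fuel cs cur acc
      = acc.reverse ++ (splitC cs).modifyHead (cur.reverse ++ ·) := by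
  induction fuel generalizing cs cur acc with
  | zero =>
    have : cs = [] := by cases cs <;> simp_all
    subst this
    simp [PySem.Chars.splitOn.go, splitC]
  | succ fuel ih =>
    cases cs with
    | nil => simp [PySem.Chars.splitOn.go, splitC]
    | cons c rest =>
      simp only [List.length_cons] at h
      by_cases hc : c = ','
      · subst hc
        rw [show PySem.Chars.splitOn.go [','] (fuel+1) (','::rest) cur acc
              = PySem.Chars.splitOn.go [','] fuel rest [] (cur.reverse :: acc) from by
            simp [PySem.Chars.splitOn.go, List.isPrefixOf]]
        rw [ih rest [] (cur.reverse :: acc) (by omega)]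
        have hid : List.modifyHead (fun x => x) (splitC rest) = splitC rest := by
          cases splitC rest <;> simp
        simp only [splitC, if_pos rfl, List.modifyHead_cons]
        simp [hid]
      · rw [show PySem.Chars.splitOn.go [','] (fuel+1) (c::rest) cur acc
              = PySem.Chars.splitOn.go [','] fuel rest (c :: cur) acc from by
            simp [PySem.Chars.splitOn.go, List.isPrefixOf, Ne.symm hc]]
        rw [ih rest (c :: cur) acc (by omega)]
        simp only [splitC, if_neg hc]
        cases h' : splitC rest with
        | nil => exact absurd h' (splitC_ne_nil rest)
        | cons p r => simp [List.modifyHead_cons]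

theorem splitOn_comma (cs : List Char) : PySem.Chars.splitOn cs [','] = splitC cs := by
  rw [PySem.Chars.splitOn, splitOn_go_spec (cs.length + 1) cs [] [] (by omega)]
  cases h : splitC cs with
  | nil => exact absurd h (splitC_ne_nil cs)
  | cons p r => simp [List.modifyHead_cons]

-- strip ignores a leading whitespace char
theorem strip_ws_cons {c : Char} (hc : PySem.Chars.isspace c = true) (p : List Char) :
    PySem.Chars.strip (c :: p) = PySem.Chars.strip p := by
  simp [PySem.Chars.strip, PySem.Chars.lstrip, List.dropWhile_cons, hc]

-- strip ignores a trailing whitespace char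
theorem strip_snoc_ws {c : Char} (hc : PySem.Chars.isspace c = true) (p : List Char) :
    PySem.Chars.strip (p ++ [c]) = PySem.Chars.strip p := by
  simp only [PySem.Chars.strip, PySem.Chars.lstrip, PySem.Chars.rstrip, List.dropWhile_append]
  split
  · next h =>
    simp only [List.isEmpty_iff] at h
    simp [List.dropWhile_cons, hc, h]
  · next h =>
    simp only [List.isEmpty_iff] at h
    simp [List.reverse_append, List.dropWhile_cons, hc]

theorem mapStrip_appLast {c : Char} (hc : PySem.Chars.isspace c = true)
    (L : List (List Char)) :
    (appLast L c).map PySem.Chars.strip = L.map PySem.Chars.strip := by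
  induction L with
  | nil => rfl
  | cons p r ih =>
    cases r with
    | nil => simp [appLast, strip_snoc_ws hc]
    | cons q r' => simpa [appLast] using ih

theorem splitC_snoc {c : Char} (hc : c ≠ ',') (x : List Char) :
    splitC (x ++ [c]) = appLast (splitC x) c := by
  induction x with
  | nil => simp [splitC, hc, appLast]
  | cons d x' ih =>
    by_cases hd : d = ','
    · subst hd
      simp only [List.cons_append, splitC, if_pos rfl, ih]
      cases h : splitC x' with
      | nil => exact absurd h (splitC_ne_nil x')
      | cons p r => simp [appLast]
    · simp only [List.cons_append, splitC, if_neg hd, ih]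
      cases h : splitC x' with
      | nil => exact absurd h (splitC_ne_nil x')
      | cons p r =>
        cases r with
        | nil => simp [appLast]
        | cons q r' => simp [appLast]

theorem mapStrip_modifyHead_ws {c : Char} (hc : PySem.Chars.isspace c = true)
    (L : List (List Char)) :
    (L.modifyHead (c :: ·)).map PySem.Chars.strip = L.map PySem.Chars.strip := by
  cases L with
  | nil => rfl
  | cons p r => simp [List.modifyHead_cons, strip_ws_cons hc]

theorem comma_not_ws : PySem.Chars.isspace ',' = false := by decide

theorem gC_cons_ws {c : Char} (hc : PySem.Chars.isspace c = true) (u : List Char) :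
    gC (c :: u) = gC u := by
  have hc' : c ≠ ',' := by rintro rfl; rw [comma_not_ws] at hc; cases hc
  simp only [gC, splitC, if_neg hc', mapStrip_modifyHead_ws hc]

theorem gC_snoc_ws {c : Char} (hc : PySem.Chars.isspace c = true) (u : List Char) :
    gC (u ++ [c]) = gC u := by
  have hc' : c ≠ ',' := by rintro rfl; rw [comma_not_ws] at hc; cases hc
  simp only [gC, splitC_snoc hc', mapStrip_appLast hc]

theorem gC_append_ws_left {a : List Char} (ha : ∀ c ∈ a, PySem.Chars.isspace c = true)
    (u : List Char) : gC (a ++ u) = gC u := by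
  induction a with
  | nil => rfl
  | cons c a' ih =>
    rw [List.cons_append, gC_cons_ws (ha c (List.mem_cons_self)) ]
    exact ih (fun d hd => ha d (List.mem_cons_of_mem c hd))

theorem gC_append_ws_right {w : List Char} (hw : ∀ c ∈ w, PySem.Chars.isspace c = true)
    (u : List Char) : gC (u ++ w) = gC u := by
  induction w generalizing u with
  | nil => simp
  | cons c w' ih =>
    have : u ++ c :: w' = (u ++ [c]) ++ w' := by simp
    rw [this, ih (fun d hd => hw d (List.mem_cons_of_mem c hd)) (u ++ [c]),
      gC_snoc_ws (hw c List.mem_cons_self)]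

theorem gC_lstrip (u : List Char) : gC (PySem.Chars.lstrip u) = gC u := by
  conv_rhs => rw [← List.takeWhile_append_dropWhile (p := PySem.Chars.isspace) (l := u)]
  rw [gC_append_ws_left (fun c hc => List.mem_takeWhile_imp hc)]
  rfl

theorem gC_rstrip (u : List Char) : gC (PySem.Chars.rstrip u) = gC u := by
  conv_rhs => rw [show u = PySem.Chars.rstrip u ++ (List.takeWhile PySem.Chars.isspace u.reverse).reverse from by
    simp only [PySem.Chars.rstrip]
    rw [← List.reverse_append, List.takeWhile_append_dropWhile, List.reverse_reverse]]
  rw [gC_append_ws_right (fun c hc => List.mem_takeWhile_imp (List.mem_reverse.mp hc))]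

theorem gC_strip (v : List Char) : gC (PySem.Chars.strip v) = gC v := by
  rw [PySem.Chars.strip, gC_rstrip, gC_lstrip]

-- strip is idempotent
theorem lstrip_of_lstrip_eq {z : List Char} (hz : PySem.Chars.lstrip z = z) :
    PySem.Chars.lstrip (PySem.Chars.rstrip z) = PySem.Chars.rstrip z := by
  have hpre : PySem.Chars.rstrip z <+: z := by
    simpa [PySem.Chars.rstrip] using (List.dropWhile_suffix (l := z.reverse) PySem.Chars.isspace).reverse
  cases h : PySem.Chars.rstrip z with
  | nil => rfl
  | cons h' t =>
    rw [h] at hpre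
    obtain ⟨rest, hrest⟩ := hpre
    have hhead : PySem.Chars.isspace h' = false := by
      by_contra hb
      have hb' : PySem.Chars.isspace h' = true := by
        cases hx : PySem.Chars.isspace h' with
        | false => exact absurd hx hb
        | true => rfl
      have : PySem.Chars.lstrip z = PySem.Chars.lstrip (t ++ rest) := by
        rw [← hrest]
        simp [PySem.Chars.lstrip, List.dropWhile_cons, hb']
      have hlen := congrArg List.length (hz.symm.trans this)
      have : (PySem.Chars.lstrip (t ++ rest)).length ≤ (t ++ rest).length :=
        List.Sublist.length_le (List.dropWhile_sublist _)
      rw [← hrest] at hlen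
      simp only [List.length_cons, List.length_append] at hlen this
      omega
    simp [PySem.Chars.lstrip, List.dropWhile_cons, hhead]

theorem rstrip_rstrip (z : List Char) :
    PySem.Chars.rstrip (PySem.Chars.rstrip z) = PySem.Chars.rstrip z := by
  simp [PySem.Chars.rstrip, List.dropWhile_idempotent]

theorem strip_idem (v : List Char) :
    PySem.Chars.strip (PySem.Chars.strip v) = PySem.Chars.strip v := by
  have h1 : PySem.Chars.lstrip (PySem.Chars.lstrip v) = PySem.Chars.lstrip v := by
    simp [PySem.Chars.lstrip, List.dropWhile_idempotent]
  simp only [PySem.Chars.strip]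
  rw [lstrip_of_lstrip_eq h1, rstrip_rstrip]

theorem splitC_no_comma {cs : List Char} (h : ¬ ',' ∈ cs) : splitC cs = [cs] := by
  induction cs with
  | nil => rfl
  | cons c rest ih =>
    have hc : c ≠ ',' := fun hh => h (hh ▸ List.mem_cons_self)
    rw [splitC, if_neg hc, ih (fun hm => h (List.mem_cons_of_mem c hm))]
    rfl

theorem isIn_comma_iff (cs : List Char) : PySem.Chars.isIn [','] cs = true ↔ ',' ∈ cs := by
  rw [PySem.Chars.isIn_iff_infix]; exact List.singleton_infix_iff ',' cs

-- split of a comma-join is the concatenation of the splits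
theorem splitC_append_comma (a b : List Char) :
    splitC (a ++ ',' :: b) = splitC a ++ splitC b := by
  induction a with
  | nil => simp [splitC]
  | cons d a' ih =>
    by_cases hd : d = ','
    · subst hd; simp [splitC, ih]
    · simp only [List.cons_append, splitC, if_neg hd, ih]
      cases h : splitC a' with
      | nil => exact absurd h (splitC_ne_nil a')
      | cons p r => simp [List.modifyHead_cons]

theorem splitC_join (parts : List (List Char)) (h : parts ≠ []) :
    splitC (List.intercalate [','] parts) = parts.flatMap splitC := by
  induction parts with
  | nil => exact absurd rfl h
  | cons p r ih =>
    cases r with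
    | nil => simp [List.intercalate]
    | cons q r' =>
      have : List.intercalate [','] (p :: q :: r') = p ++ ',' :: List.intercalate [','] (q :: r') := by
        simp [List.intercalate, List.intersperse]
      rw [this, splitC_append_comma, ih (by simp)]
      rfl

-- String-level normal form
def gS (v : String) : List String := (gC v.toList).map String.ofList

theorem ofList_ne_empty_iff (cs : List Char) : (String.ofList cs ≠ "") ↔ cs ≠ [] := by
  constructor
  · rintro h rfl; exact h rfl
  · intro h hc
    have := congrArg String.toList hc
    rw [String.toList_ofList] at this
    exact h (by simpa using this)

-- pieces→Strings: strip then filter commutes with mapping ofList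
theorem map_filter_ofList (L : List (List Char)) :
    (((L.map String.ofList).map PySem.Str.strip).filter (fun p => p ≠ "")) =
      ((L.map PySem.Chars.strip).filter (fun p => p ≠ [])).map String.ofList := by
  induction L with
  | nil => rfl
  | cons p r ih =>
    have hstr : PySem.Str.strip (String.ofList p) = String.ofList (PySem.Chars.strip p) := by
      simp [PySem.Str.strip]
    simp only [List.map_cons, List.filter_cons, hstr]
    by_cases h : PySem.Chars.strip p = []
    · have h2 : String.ofList (PySem.Chars.strip p) = "" := by rw [h]
      simp only [h, h2]
      simpa using ih
    · have h2 : String.ofList (PySem.Chars.strip p) ≠ "" := (ofList_ne_empty_iff _).mpr h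
      simp [h2, h]
      simpa using ih

-- A's per-element contribution equals the normal form gS
theorem elemA_S (v : String) :
    (let v' := PySem.Str.strip v
     if v' = "" then ([] : List String)
     else if PySem.Str.isIn "," v' then
       (((PySem.Str.split? v' ",").getD []).map PySem.Str.strip).filter (fun x => x ≠ "")
     else [v']) = gS v := by
  have hv : PySem.Str.strip v = String.ofList (PySem.Chars.strip v.toList) := by
    simp [PySem.Str.strip]
  simp only [hv]
  by_cases h0 : PySem.Chars.strip v.toList = []
  · rw [if_pos (by rw [h0])]
    rw [gS, ← gC_strip v.toList, h0]
    rfl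
  · rw [if_neg ((ofList_ne_empty_iff _).mpr h0)]
    have hIn : PySem.Str.isIn "," (String.ofList (PySem.Chars.strip v.toList))
        = PySem.Chars.isIn [','] (PySem.Chars.strip v.toList) := by
      simp [PySem.Str.isIn]
    by_cases h1 : PySem.Chars.isIn [','] (PySem.Chars.strip v.toList) = true
    · rw [if_pos (by rw [hIn]; exact h1)]
      have hsplit : (PySem.Str.split? (String.ofList (PySem.Chars.strip v.toList)) ",").getD []
          = (splitC (PySem.Chars.strip v.toList)).map String.ofList := by
        simp [PySem.Str.split?, PySem.Chars.split?, splitOn_comma]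
      rw [hsplit, map_filter_ofList, gS, ← gC_strip v.toList]
      rfl
    · rw [if_neg (by rw [hIn]; exact h1)]
      have hnc : ¬ ',' ∈ PySem.Chars.strip v.toList :=
        fun hm => h1 ((isIn_comma_iff _).mpr hm)
      rw [gS, ← gC_strip v.toList]
      show [String.ofList (PySem.Chars.strip v.toList)]
        = (gC (PySem.Chars.strip v.toList)).map String.ofList
      rw [gC, splitC_no_comma hnc]
      have hid : PySem.Chars.strip (PySem.Chars.strip v.toList) = PySem.Chars.strip v.toList :=
        strip_idem v.toList
      simp [hid, h0]

-- the B port computes flatMap gS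
theorem B_eq (vals : Option (List String)) :
    parse_class_args_py_alt vals = (vals.getD []).flatMap gS := by
  unfold parse_class_args_py_alt
  cases hl : vals.getD [] with
  | nil => rfl
  | cons v vs =>
    simp only [PySem.Str.join, PySem.Str.split?, PySem.Chars.split?]
    have hsep : (",":String).toList = [','] := rfl
    rw [hsep]
    simp only [List.isEmpty_iff, String.toList_ofList]
    rw [if_neg (by simp)]
    simp only [Option.map_some, Option.getD_some]
    rw [splitOn_comma]
    simp only [PySem.Chars.join]
    rw [splitC_join (List.map String.toList (v :: vs)) (by simp), List.flatMap_map]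
    have : ∀ (l : List String),
        ((((l.flatMap fun v => splitC v.toList).map String.ofList).map PySem.Str.strip).filter
          (fun p => p ≠ "")) = l.flatMap gS := by
      intro l
      rw [map_filter_ofList]
      induction l with
      | nil => rfl
      | cons w ws ihw =>
        simp only [List.flatMap_cons, List.map_append, List.filter_append, List.map_append, gS, gC, ihw]
    have hmm : (List.map String.ofList ((v :: vs).flatMap fun v => splitC v.toList)) =
        ((v :: vs).flatMap fun v => splitC v.toList).map String.ofList := rfl
    calc (((((v :: vs).flatMap fun v => splitC v.toList).map String.ofList).map PySem.Str.strip).filter (fun p => p ≠ ""))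
        = (v :: vs).flatMap gS := this (v :: vs)

-- the A port computes flatMap gS
theorem A_fold (l : List String) (acc : List String) :
    l.foldl (fun out v =>
        let v' := PySem.Str.strip v
        if v' = "" then out
        else if PySem.Str.isIn "," v' then
          out ++ ((((PySem.Str.split? v' ",").getD []).map PySem.Str.strip).filter (fun x => x ≠ ""))
        else out ++ [v']) acc = acc ++ l.flatMap gS := by
  induction l generalizing acc with
  | nil => simp
  | cons v vs ih =>
    rw [List.foldl_cons, ih]
    have hbody :
        (let v' := PySem.Str.strip v
         if v' = "" then acc
         else if PySem.Str.isIn "," v' then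
           acc ++ ((((PySem.Str.split? v' ",").getD []).map PySem.Str.strip).filter (fun x => x ≠ ""))
         else acc ++ [v']) = acc ++ gS v := by
      have he := elemA_S v
      simp only [] at he ⊢
      split_ifs at he ⊢ with h1 h2 <;> simp [← he]
    rw [hbody]
    simp

theorem A_eq (vals : Option (List String)) :
    parse_class_args_py vals = (vals.getD []).flatMap gS := by
  cases vals with
  | none => rfl
  | some l =>
    cases l with
    | nil => rfl
    | cons v vs =>
      have h0 : parse_class_args_py (some (v :: vs)) = List.foldl (fun out v =>
          let v' := PySem.Str.strip v
          if v' = "" then out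
          else if PySem.Str.isIn "," v' then
            out ++ ((((PySem.Str.split? v' ",").getD []).map PySem.Str.strip).filter (fun x => x ≠ ""))
          else out ++ [v']) [] (v :: vs) := rfl
      rw [h0, A_fold]
      simp

-- ===== VERDICT (by name: the statement is the Claim_ definition above) =====
theorem parse_class_args_py_spec : Claim_equal_parse_class_args_py := by
  intro vals _
  unfold Spec_parse_class_args_py
  rw [A_eq, B_eq]
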